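-- pv_equiv track=rewrite | github.com/timgusev777/octo-mocto | guessing_numbers (lab 2).py | bin_guess_number
-- ===== SOURCE A (Python) =====
-- def bin_guess_number(number, start, finish):
--     lst = []
--     steps = 0
--     """функция ищет загаданное число и возвращает само число и количество 'шагов' необходимых для бинарного поиска"""
--     for i in range(start, finish+1):
--         lst.append(i)
--
--     low = 0
--     high = len(lst) - 1
--
--     while low <= high:
--         mid = (low + high) // 2
--         if lst[mid] == number:
--             return (number, steps + 1)
--
--         elif number > lst[mid]:
--             low = mid + 1
--             steps += 1
--         else:
--             high = mid - 1
--             steps += 1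
--
--     return(None, steps)
-- ===== SOURCE B (Python) =====
-- def bin_guess_number(number, start, finish):
--     # Recursive divide-and-conquer on a NORMALISED block: a block of n consecutive
--     # values with the target sitting at zero-based offset k (k may lie outside
--     # [0, n) when number is out of range).  No list, no lo/hi bounds, no mutable
--     # step counter: the step count is composed on the way back up the recursion.
--     def go(n, k):
--         if n <= 0:
--             return (False, 0)
--         m = (n - 1) // 2
--         if k == m:
--             return (True, 1)
--         if k > m:
--             found, s = go(n - 1 - m, k - m - 1)
--         else:
--             found, s = go(m, k)
--         return (found, s + 1)
--     found, s = go(finish - start + 1, number - start)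
--     return (number if found else None, s)
-- ===== Notes on version B (the rewrite author's own statement) =====
-- stated objective: faster
-- what changed: B replaces A's materialised list and iterative lo/hi index search with a recursive divide-and-conquer on a normalised (block-size, zero-based offset) pair: no list, no bounds, no mutable counter — the step count is composed on return.
import Mathlib
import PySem

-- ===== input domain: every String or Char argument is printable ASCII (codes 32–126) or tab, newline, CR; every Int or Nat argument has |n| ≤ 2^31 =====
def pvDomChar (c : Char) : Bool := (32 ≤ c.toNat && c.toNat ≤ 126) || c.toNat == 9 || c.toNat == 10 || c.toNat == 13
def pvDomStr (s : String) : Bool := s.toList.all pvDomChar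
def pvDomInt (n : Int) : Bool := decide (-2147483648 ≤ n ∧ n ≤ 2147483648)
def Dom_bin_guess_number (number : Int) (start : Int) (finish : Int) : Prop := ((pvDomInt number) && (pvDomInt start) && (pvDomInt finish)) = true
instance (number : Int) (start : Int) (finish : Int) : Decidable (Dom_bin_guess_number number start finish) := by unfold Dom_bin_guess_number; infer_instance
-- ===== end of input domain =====

-- B replaces A's O(n) list + iterative lo/hi index search by a recursive
-- divide-and-conquer on a normalised (block-size, offset) pair; equality of
-- return values is proved.

-- ===== PORT A =====
-- A's while loop: binary search by INDEX into the materialised list lst.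
-- fuel is a totality guard only: the interval [low,high] loses at least one
-- element per iteration, and bin_guess_number supplies fuel = lst.length + 1.
-- The `none` branch of pyGet? is Python's IndexError; it is unreachable from
-- bin_guess_number (there 0 ≤ low and high < lst.length throughout).
def binSearchA (number : Int) (lst : List Int) : Nat → Int → Int → Int → Option Int × Int
  | 0, _, _, steps => (none, steps)
  | fuel + 1, low, high, steps =>
    if low ≤ high then
      let mid := PySem.Int.floordiv (low + high) 2
      match PySem.List.pyGet? lst mid with
      | some v =>
          if v = number then (some number, steps + 1)
          else if number > v then binSearchA number lst fuel (mid + 1) high (steps + 1)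
          else binSearchA number lst fuel low (mid - 1) (steps + 1)
      | none => (none, steps)
    else (none, steps)

def bin_guess_number (number : Int) (start : Int) (finish : Int) : Option Int × Int :=
  -- lst = []; for i in range(start, finish+1): lst.append(i)
  let lst : List Int := (PySem.List.pyRange start (finish + 1) 1).foldl (fun acc i => acc ++ [i]) []
  let steps : Int := 0
  let low : Int := 0
  let high : Int := (lst.length : Int) - 1
  binSearchA number lst (lst.length + 1) low high steps

-- ===== PORT B =====
-- B's helper go: recursion on a block of n consecutive values with the target
-- at zero-based offset k; the step count is composed on the way back up.
-- fuel is a totality guard only: the block shrinks at every call, and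
-- bin_guess_number_alt supplies fuel = (finish - start + 1).toNat + 1.
def goB : Nat → Int → Int → Bool × Int
  | 0, _, _ => (false, 0)
  | fuel + 1, n, k =>
    if n ≤ 0 then (false, 0)
    else
      let m := PySem.Int.floordiv (n - 1) 2
      if k = m then (true, 1)
      else if k > m then
        let r := goB fuel (n - 1 - m) (k - m - 1)
        (r.1, r.2 + 1)
      else
        let r := goB fuel m k
        (r.1, r.2 + 1)

def bin_guess_number_alt (number : Int) (start : Int) (finish : Int) : Option Int × Int :=
  let r := goB ((finish - start + 1).toNat + 1) (finish - start + 1) (number - start)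
  (if r.1 then some number else none, r.2)

-- ===== PRECONDITION & SPEC =====
def Spec_bin_guess_number (number : Int) (start : Int) (finish : Int) (out : Option Int × Int) : Prop := out = bin_guess_number_alt number start finish
instance (number : Int) (start : Int) (finish : Int) (out : Option Int × Int) : Decidable (Spec_bin_guess_number number start finish out) := by unfold Spec_bin_guess_number; infer_instance

-- ===== CLAIM (what is proved, stated in full; the proofs are below) =====
def Claim_equal_bin_guess_number : Prop := ∀ (number : Int) (start : Int) (finish : Int), Dom_bin_guess_number number start finish → Spec_bin_guess_number number start finish (bin_guess_number number start finish)

-- ===== LEMMAS AND PROOFS =====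

-- the midpoint m = (x - 1) // 2 for 1 ≤ x, by the floor-division characterisation
theorem floordiv_pred_two_bounds {x : Int} (h : 1 ≤ x) :
    PySem.Int.floordiv (x - 1) 2 * 2 ≤ x - 1 ∧ x - 1 < (PySem.Int.floordiv (x - 1) 2 + 1) * 2 :=
  (PySem.Int.floordiv_eq_iff_of_pos (by norm_num)).mp rfl

-- shifting a floor-division midpoint by a constant s
theorem floordiv_two_shift (s x : Int) :
    PySem.Int.floordiv (s + s + x) 2 = s + PySem.Int.floordiv x 2 := by
  have hq : PySem.Int.floordiv x 2 * 2 ≤ x ∧ x < (PySem.Int.floordiv x 2 + 1) * 2 :=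
    (PySem.Int.floordiv_eq_iff_of_pos (by norm_num)).mp rfl
  rw [PySem.Int.floordiv_eq_iff_of_pos (by norm_num)]
  omega

-- A's index loop on lst = [start..] equals B's normalised recursion at the same
-- fuel: block size n = high+1-low, offset k = (number - start) - low.
theorem binSearch_eq_go (number start : Int) (lst : List Int)
    (hget : ∀ i : Int, 0 ≤ i → i < (lst.length : Int) → PySem.List.pyGet? lst i = some (start + i)) :
    ∀ (fuel : Nat) (low high steps : Int), high + 1 - low < (fuel : Int) →
      0 ≤ low → high < (lst.length : Int) →
      binSearchA number lst fuel low high steps =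
        (if (goB fuel (high + 1 - low) (number - start - low)).1 then some number else none,
         steps + (goB fuel (high + 1 - low) (number - start - low)).2) := by
  intro fuel
  induction fuel with
  | zero =>
    intro low high steps _ _ _
    rw [binSearchA, goB]
    simp
  | succ fuel ih =>
    intro low high steps hf hlow hhigh
    rw [binSearchA, goB]
    by_cases h : low ≤ high
    · rw [if_pos h, if_neg (by omega : ¬ (high + 1 - low ≤ 0))]
      obtain ⟨hb1, hb2⟩ := floordiv_pred_two_bounds (show (1:Int) ≤ high + 1 - low by omega)
      have hmid : PySem.Int.floordiv (low + high) 2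
          = low + PySem.Int.floordiv (high + 1 - low - 1) 2 := by
        have hs := floordiv_two_shift low (high - low)
        have hx : low + low + (high - low) = low + high := by ring
        have hy : high + 1 - low - 1 = high - low := by ring
        rw [hx] at hs
        rw [hy, hs]
      set m := PySem.Int.floordiv (high + 1 - low - 1) 2 with hmdef
      rw [hmid]
      dsimp only
      rw [hget (low + m) (by omega) (by omega)]
      dsimp only
      by_cases he : number - start - low = m
      · rw [if_pos (by omega : start + (low + m) = number), if_pos he]
        simp
      · rw [if_neg (by omega : ¬ (start + (low + m) = number)), if_neg he]
        by_cases hgt : number - start - low > m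
        · rw [if_pos (by omega : number > start + (low + m)), if_pos hgt]
          rw [ih (low + m + 1) high (steps + 1) (by omega) (by omega) hhigh]
          have h1 : high + 1 - (low + m + 1) = high + 1 - low - 1 - m := by ring
          have h2 : number - start - (low + m + 1) = number - start - low - m - 1 := by ring
          rw [h1, h2]
          congr 1
          ring
        · rw [if_neg (by omega : ¬ (number > start + (low + m))), if_neg hgt]
          rw [ih low (low + m - 1) (steps + 1) (by omega) hlow (by omega)]
          have h1 : low + m - 1 + 1 - low = m := by ring
          rw [h1]
          congr 1
          ring
    · rw [if_neg h, if_pos (by omega : high + 1 - low ≤ 0)]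
      simp

theorem foldl_append_id (xs : List Int) :
    xs.foldl (fun acc i => acc ++ [i]) [] = xs := by
  have h : ∀ pre : List Int, xs.foldl (fun acc i => acc ++ [i]) pre = pre ++ xs := by
    induction xs with
    | nil => simp
    | cons x xs ihx => intro pre; simp [List.foldl, ihx]
  simpa using h []

-- ===== VERDICT (by name: the statement is the Claim_ definition above) =====
theorem bin_guess_number_spec : Claim_equal_bin_guess_number := by
  intro number start finish _
  unfold Spec_bin_guess_number bin_guess_number bin_guess_number_alt
  rw [foldl_append_id]
  have hlen : (PySem.List.pyRange start (finish + 1) 1).length = (finish + 1 - start).toNat :=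
    PySem.List.length_pyRange_one start (finish + 1)
  have hget : ∀ i : Int, 0 ≤ i → i < ((PySem.List.pyRange start (finish + 1) 1).length : Int) →
      PySem.List.pyGet? (PySem.List.pyRange start (finish + 1) 1) i = some (start + i) := by
    intro i h0 hi
    rw [PySem.List.pyGet?_eq_some_getElem _ h0 hi, PySem.List.getElem_pyRange_one]
    congr 1
    omega
  rw [binSearch_eq_go number start (PySem.List.pyRange start (finish + 1) 1) hget
      ((PySem.List.pyRange start (finish + 1) 1).length + 1)
      0 (((PySem.List.pyRange start (finish + 1) 1).length : Int) - 1) 0 (by push_cast; omega)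
      (by omega) (by omega)]
  by_cases hsf : start ≤ finish
  · have h1 : ((PySem.List.pyRange start (finish + 1) 1).length : Int) - 1 + 1 - 0
        = finish - start + 1 := by omega
    have h2 : (PySem.List.pyRange start (finish + 1) 1).length + 1
        = (finish - start + 1).toNat + 1 := by omega
    have h3 : number - start - 0 = number - start := by ring
    rw [h1, h2, h3]
    simp
  · -- empty range: both recursions return (false, 0) at once
    have h0 : ((PySem.List.pyRange start (finish + 1) 1).length : Int) = 0 := by omega
    have h0' : (PySem.List.pyRange start (finish + 1) 1).length = 0 := by omega
    have ht : (finish - start + 1).toNat = 0 := by omega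
    rw [h0', ht, goB, goB]
    rw [if_pos (by omega : ((0:Nat) : Int) - 1 + 1 - 0 ≤ 0), if_pos (by omega : finish - start + 1 ≤ 0)]
    simp
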